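-- pv_equiv track=rewrite | github.com/Soroush2/coding-practice | hacker-rank/subarrays_with_sum.py | countSubarraysWithSumAndMaxAtMost
-- ===== SOURCE A (Python) =====
-- def countSubarraysWithSumAndMaxAtMost(nums, k, M):
--     sub_array=[]
--     custom_array=[]
--     n=len(nums)
--     sum_custom=0
--     i=0
--     for i in range(n):
--         greater=False
--         for j in range(i,n):
--             custom_array=nums[i:j+1]
--             for element in custom_array:
--                 if element > M:
--                     greater=True
--                     break
--             if greater:
--                 break
--             sum_custom=sum(custom_array)
--             if sum_custom==k:
--                 sub_array.append(custom_array.copy())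
--     return len(sub_array)
-- ===== SOURCE B (Python) =====
-- def countSubarraysWithSumAndMaxAtMost(nums, k, M):
--     n = len(nums)
--     count = 0
--     for start in range(n):
--         running = 0
--         for j in range(start, n):
--             x = nums[j]
--             if x > M:
--                 break
--             running += x
--             if running == k:
--                 count += 1
--     return count
-- ===== Notes on version B (the rewrite author's own statement) =====
-- stated objective: faster
-- what changed: Replaces the triple loop (slice each candidate subarray, rescan it for an element > M, re-sum it) by a single pass per suffix that maintains a running sum and breaks at the first element > M.
import Mathlib
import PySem

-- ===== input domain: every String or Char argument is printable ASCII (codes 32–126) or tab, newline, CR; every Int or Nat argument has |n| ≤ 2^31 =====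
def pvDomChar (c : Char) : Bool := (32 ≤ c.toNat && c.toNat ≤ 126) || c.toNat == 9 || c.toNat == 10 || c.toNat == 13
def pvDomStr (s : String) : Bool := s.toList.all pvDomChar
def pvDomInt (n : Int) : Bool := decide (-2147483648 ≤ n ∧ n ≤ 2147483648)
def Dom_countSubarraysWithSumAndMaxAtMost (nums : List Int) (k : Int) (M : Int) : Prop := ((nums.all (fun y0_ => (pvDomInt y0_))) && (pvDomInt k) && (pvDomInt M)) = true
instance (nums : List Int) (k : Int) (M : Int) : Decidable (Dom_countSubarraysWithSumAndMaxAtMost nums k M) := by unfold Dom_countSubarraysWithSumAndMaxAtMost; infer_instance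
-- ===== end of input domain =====

-- B replaces A's slice/rescan/re-sum triple loop by a running-sum pass per suffix (O(n^3) → O(n^2)); return values are equal everywhere.

-- ===== PORT A =====
-- 'for element in custom_array: if element > M: greater = True; break'
def aScanGreater (M : Int) : List Int → Bool
  | [] => false
  | x :: xs => if x > M then true else aScanGreater M xs

-- inner 'for j in range(i, n)' loop; cnt models len(sub_array)
def aInner (nums : List Int) (k M : Int) (i : Nat) (j : Nat) (cnt : Int) : Int :=
  if h : j < nums.length then
    let custom := PySem.List.slice nums (some (i : Int)) (some ((j + 1 : Nat) : Int))
    if aScanGreater M custom then cnt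
    else
      let cnt := if custom.sum = k then cnt + 1 else cnt
      aInner nums k M i (j + 1) cnt
  else cnt
termination_by nums.length - j

-- outer 'for i in range(n)' loop
def aOuter (nums : List Int) (k M : Int) (i : Nat) (cnt : Int) : Int :=
  if h : i < nums.length then
    aOuter nums k M (i + 1) (aInner nums k M i i cnt)
  else cnt
termination_by nums.length - i

def countSubarraysWithSumAndMaxAtMost (nums : List Int) (k : Int) (M : Int) : Int :=
  aOuter nums k M 0 0

-- ===== PORT B =====
-- inner 'for j in range(start, n)' with running sum and early break
def bInner (nums : List Int) (k M : Int) (j : Nat) (running cnt : Int) : Int :=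
  if h : j < nums.length then
    let x := nums[j]
    if x > M then cnt
    else
      let running' := running + x
      bInner nums k M (j + 1) running' (if running' = k then cnt + 1 else cnt)
  else cnt
termination_by nums.length - j

-- outer 'for start in range(n)' loop
def bOuter (nums : List Int) (k M : Int) (start : Nat) (cnt : Int) : Int :=
  if start < nums.length then
    bOuter nums k M (start + 1) (bInner nums k M start 0 cnt)
  else cnt
termination_by nums.length - start

def countSubarraysWithSumAndMaxAtMost_alt (nums : List Int) (k : Int) (M : Int) : Int :=
  bOuter nums k M 0 0

-- ===== PRECONDITION & SPEC =====
def Spec_countSubarraysWithSumAndMaxAtMost (nums : List Int) (k : Int) (M : Int) (out : Int) : Prop := out = countSubarraysWithSumAndMaxAtMost_alt nums k M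
instance (nums : List Int) (k : Int) (M : Int) (out : Int) : Decidable (Spec_countSubarraysWithSumAndMaxAtMost nums k M out) := by unfold Spec_countSubarraysWithSumAndMaxAtMost; infer_instance

-- ===== CLAIM (what is proved, stated in full; the proofs are below) =====
def Claim_equal_countSubarraysWithSumAndMaxAtMost : Prop := ∀ (nums : List Int) (k : Int) (M : Int), Dom_countSubarraysWithSumAndMaxAtMost nums k M → Spec_countSubarraysWithSumAndMaxAtMost nums k M (countSubarraysWithSumAndMaxAtMost nums k M)

-- ===== LEMMAS AND PROOFS =====

theorem aScanGreater_eq_any (M : Int) (l : List Int) :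
    aScanGreater M l = l.any (fun x => decide (M < x)) := by
  induction l with
  | nil => simp [aScanGreater]
  | cons x xs ih =>
    by_cases h : x > M <;> simp [aScanGreater, h, ih]

-- the i..j slice A recomputes, as drop/take; B's running sum is its sum
theorem inner_eq (nums : List Int) (k M : Int) (i : Nat) :
    ∀ (j : Nat) (cnt : Int), i ≤ j →
    ((nums.drop i).take (j - i)).any (fun x => decide (M < x)) = false →
    aInner nums k M i j cnt
      = bInner nums k M j ((nums.drop i).take (j - i)).sum cnt := by
  intro j
  induction hfuel : nums.length - j using Nat.strong_induction_on generalizing j with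
  | _ fuel ih =>
  intro cnt hij hscan
  rw [aInner, bInner]
  by_cases h : j < nums.length
  · simp only [h, dif_pos]
    have hd : j - i < (nums.drop i).length := by
      simp [List.length_drop]; omega
    have htake : (nums.drop i).take (j + 1 - i)
        = (nums.drop i).take (j - i) ++ [(nums.drop i)[j - i]] := by
      have : j + 1 - i = (j - i) + 1 := by omega
      rw [this, List.take_add_one, List.getElem?_eq_getElem hd]
      simp
    have hget : (nums.drop i)[j - i] = nums[j]'h := by
      rw [List.getElem_drop]
      congr 1
      omega
    have hslice : PySem.List.slice nums (some (i : Int)) (some ((j + 1 : Nat) : Int))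
        = (nums.drop i).take (j - i) ++ [nums[j]'h] := by
      rw [PySem.List.slice_natCast, htake, hget]
    rw [hslice]
    rw [aScanGreater_eq_any, List.any_append]
    rw [hscan]
    simp only [Bool.false_or, List.any_cons, List.any_nil, Bool.or_false]
    by_cases hM : M < nums[j]'h
    · simp [hM, gt_iff_lt]
    · simp only [hM, decide_false, if_false]
      rw [if_neg (by simp)]
      have hs' : ((nums.drop i).take (j - i)).sum + nums[j]'h
          = ((nums.drop i).take (j + 1 - i)).sum := by
        rw [htake, hget]; simp
      show aInner nums k M i (j + 1) _ = bInner nums k M (j + 1) _ _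
      simp only [List.sum_append, List.sum_cons, List.sum_nil, add_zero]
      rw [ih (nums.length - (j + 1)) (by omega) (j + 1) (by omega) _ (by omega)
        (by rw [htake, hget, List.any_append, hscan]; simp [hM])]
      rw [← hs']
  · simp [h]

theorem outer_eq (nums : List Int) (k M : Int) :
    ∀ (i : Nat) (cnt : Int), aOuter nums k M i cnt = bOuter nums k M i cnt := by
  intro i
  induction hfuel : nums.length - i using Nat.strong_induction_on generalizing i with
  | _ fuel ih =>
  intro cnt
  rw [aOuter, bOuter]
  by_cases h : i < nums.length
  · simp only [h, dif_pos, if_pos]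
    rw [ih (nums.length - (i + 1)) (by omega) (i + 1) (by omega)]
    congr 1
    have h2 := inner_eq nums k M i i cnt (le_refl i) (by simp)
    rw [Nat.sub_self, List.take_zero, List.sum_nil] at h2
    exact h2
  · simp [h]

-- ===== VERDICT (by name: the statement is the Claim_ definition above) =====
theorem countSubarraysWithSumAndMaxAtMost_spec : Claim_equal_countSubarraysWithSumAndMaxAtMost := by
  intro nums k M _
  unfold Spec_countSubarraysWithSumAndMaxAtMost countSubarraysWithSumAndMaxAtMost countSubarraysWithSumAndMaxAtMost_alt
  exact outer_eq nums k M 0 0
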